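-- pv_equiv track=rewrite | github.com/adaelves/7.19 | app/plugins/tumblr.py | _is_nsfw_content
-- ===== SOURCE A (Python) =====
-- from typing import List, Dict, Any, Optional
--
-- def _is_nsfw_content(tags: List[str], content: str) -> bool:
--     """Check if content is NSFW"""
--     nsfw_indicators = ['nsfw', 'adult', 'mature', '18+', 'explicit']
--
--     # Check tags
--     for tag in tags:
--         if any(indicator in tag.lower() for indicator in nsfw_indicators):
--             return True
--
--     # Check content
--     if any(indicator in content.lower() for indicator in nsfw_indicators):
--         return True
--
--     return False
-- ===== SOURCE B (Python) =====
-- def _is_nsfw_content(tags, content):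
--     """Check if content is NSFW"""
--     nsfw_indicators = ['nsfw', 'adult', 'mature', '18+', 'explicit']
--     combined = "\n".join([t.lower() for t in tags] + [content.lower()])
--     return any(indicator in combined for indicator in nsfw_indicators)
-- ===== Notes on version B (the rewrite author's own statement) =====
-- stated objective: faster
-- what changed: B builds one '\n'-joined lowercased search string from all tags and the content and does a single indicator-outer substring scan, instead of A's per-tag Python loop (each tag lowered and scanned by all 5 indicators) followed by a separate content check.
import Mathlib
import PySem

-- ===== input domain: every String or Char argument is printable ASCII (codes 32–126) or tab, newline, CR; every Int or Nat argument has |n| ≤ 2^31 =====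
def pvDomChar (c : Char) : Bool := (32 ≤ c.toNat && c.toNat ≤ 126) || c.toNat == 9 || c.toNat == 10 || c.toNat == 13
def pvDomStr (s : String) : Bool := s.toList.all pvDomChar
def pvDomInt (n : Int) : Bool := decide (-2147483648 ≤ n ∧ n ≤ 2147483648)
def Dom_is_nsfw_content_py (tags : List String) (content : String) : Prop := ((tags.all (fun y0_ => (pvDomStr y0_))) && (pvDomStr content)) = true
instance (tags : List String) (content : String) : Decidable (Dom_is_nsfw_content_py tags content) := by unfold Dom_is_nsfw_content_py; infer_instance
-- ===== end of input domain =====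

-- B joins all tags and the content (lowercased) into one '\n'-separated search string and
-- does a single indicator-outer substring scan, instead of A's tag loop plus separate content
-- check (measured faster in a timing run: one C-level scan per indicator replaces per-tag work).

-- ===== PORT A =====
-- the 'for tag in tags: if any(...): return True' loop, early return kept as a recursion
def pvTagLoop (inds : List String) : List String → Bool
  | [] => false
  | t :: ts =>
    if inds.any (fun ind => PySem.Str.isIn ind (PySem.Str.lower t)) then true
    else pvTagLoop inds ts

def is_nsfw_content_py (tags : List String) (content : String) : Bool :=
  let nsfw_indicators := ["nsfw", "adult", "mature", "18+", "explicit"]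
  if pvTagLoop nsfw_indicators tags then true
  else if nsfw_indicators.any (fun ind => PySem.Str.isIn ind (PySem.Str.lower content)) then true
  else false

-- ===== PORT B =====
def is_nsfw_content_py_alt (tags : List String) (content : String) : Bool :=
  let nsfw_indicators := ["nsfw", "adult", "mature", "18+", "explicit"]
  let combined := PySem.Str.join "\n" (tags.map PySem.Str.lower ++ [PySem.Str.lower content])
  nsfw_indicators.any (fun indicator => PySem.Str.isIn indicator combined)

-- ===== PRECONDITION & SPEC =====
def Spec_is_nsfw_content_py (tags : List String) (content : String) (out : Bool) : Prop := out = is_nsfw_content_py_alt tags content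
instance (tags : List String) (content : String) (out : Bool) : Decidable (Spec_is_nsfw_content_py tags content out) := by unfold Spec_is_nsfw_content_py; infer_instance

-- ===== CLAIM (what is proved, stated in full; the proofs are below) =====
def Claim_equal_is_nsfw_content_py : Prop := ∀ (tags : List String) (content : String), Dom_is_nsfw_content_py tags content → Spec_is_nsfw_content_py tags content (is_nsfw_content_py tags content)

-- ===== LEMMAS AND PROOFS =====

-- a pattern without the separator char that is a prefix of xs ++ c :: ys is a prefix of xs
theorem pv_prefix_split {c : Char} {ind xs ys : List Char} (hc : c ∉ ind)
    (h : ind <+: xs ++ c :: ys) : ind <+: xs := by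
  induction ind generalizing xs with
  | nil => exact List.nil_prefix
  | cons i ind' ih =>
    cases xs with
    | nil =>
      rcases h with ⟨t, ht⟩
      simp only [List.cons_append, List.nil_append, List.cons.injEq] at ht
      exact absurd (ht.1 ▸ List.mem_cons_self) hc
    | cons x xs' =>
      rcases h with ⟨t, ht⟩
      simp only [List.cons_append, List.cons.injEq] at ht
      rw [List.cons_prefix_cons]
      exact ⟨ht.1, ih (fun hm => hc (List.mem_cons_of_mem _ hm)) ⟨t, ht.2⟩⟩

-- splitting an infix test over one separator occurrence
theorem pv_infix_split {c : Char} {ind : List Char} (hc : c ∉ ind) (xs ys : List Char) :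
    ind <:+: xs ++ c :: ys ↔ ind <:+: xs ∨ ind <:+: ys := by
  induction xs with
  | nil =>
    simp only [List.nil_append]
    rw [List.infix_cons_iff]
    constructor
    · rintro (hp | hi)
      · cases ind with
        | nil => exact Or.inl List.nil_infix
        | cons i ind' =>
          rcases hp with ⟨t, ht⟩
          simp only [List.cons_append, List.cons.injEq] at ht
          exact absurd (ht.1 ▸ List.mem_cons_self) hc
      · exact Or.inr hi
    · rintro (hi | hi)
      · rw [List.infix_nil] at hi
        subst hi
        exact Or.inr List.nil_infix
      · exact Or.inr hi
  | cons x xs' ih =>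
    rw [List.cons_append, List.infix_cons_iff, ih, List.infix_cons_iff]
    constructor
    · rintro (hp | hi | hi)
      · exact Or.inl (Or.inl (pv_prefix_split hc hp))
      · exact Or.inl (Or.inr hi)
      · exact Or.inr hi
    · rintro ((hp | hi) | hi)
      · exact Or.inl (hp.trans (List.prefix_append _ _))
      · exact Or.inr (Or.inl hi)
      · exact Or.inr (Or.inr hi)

-- infix of a '\n'-join of a nonempty list of parts = infix of some part (pattern has no '\n')
theorem pv_infix_join {c : Char} {ind : List Char} (hc : c ∉ ind) (p : List Char)
    (ps : List (List Char)) :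
    ind <:+: PySem.Chars.join [c] (p :: ps) ↔ ∃ q ∈ p :: ps, ind <:+: q := by
  induction ps generalizing p with
  | nil =>
    rw [PySem.Chars.join_singleton]
    simp
  | cons q qs ih =>
    rw [PySem.Chars.join_cons_cons]
    have hshape : p ++ [c] ++ PySem.Chars.join [c] (q :: qs)
        = p ++ c :: PySem.Chars.join [c] (q :: qs) := by simp
    rw [hshape, pv_infix_split hc, ih q]
    constructor
    · rintro (h | ⟨r, hr, hir⟩)
      · exact ⟨p, List.mem_cons_self, h⟩
      · exact ⟨r, List.mem_cons_of_mem _ hr, hir⟩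
    · rintro ⟨r, hr, hir⟩
      rcases List.mem_cons.mp hr with h | h
      · exact Or.inl (h ▸ hir)
      · exact Or.inr ⟨r, h, hir⟩

-- A's tag loop is an `any`
theorem pvTagLoop_eq_any (inds tags : List String) :
    pvTagLoop inds tags =
      tags.any (fun t => inds.any (fun ind => PySem.Str.isIn ind (PySem.Str.lower t))) := by
  induction tags with
  | nil => rfl
  | cons t ts ih =>
    simp only [pvTagLoop, List.any_cons]
    split_ifs with h
    · rw [h, Bool.true_or]
    · rw [Bool.not_eq_true] at h
      rw [h, Bool.false_or, ih]

-- one indicator: membership in the combined string = membership in some source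
theorem pv_ind_combined (ind : String) (hc : '\n' ∉ ind.toList) (tags : List String)
    (content : String) :
    PySem.Str.isIn ind (PySem.Str.join "\n" (tags.map PySem.Str.lower ++ [PySem.Str.lower content]))
      = (tags.any (fun t => PySem.Str.isIn ind (PySem.Str.lower t))
         || PySem.Str.isIn ind (PySem.Str.lower content)) := by
  rw [Bool.eq_iff_iff, PySem.Str.isIn_iff_infix]
  have hx : (PySem.Str.join "\n" (tags.map PySem.Str.lower ++ [PySem.Str.lower content])).toList
      = PySem.Chars.join ['\n']
          ((tags.map (fun t => PySem.Chars.lower t.toList)) ++ [PySem.Chars.lower content.toList]) := by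
    simp [Function.comp_def]
  rw [hx]
  cases tags with
  | nil =>
    simp only [List.map_nil, List.nil_append, PySem.Chars.join_singleton, List.any_nil,
      Bool.false_or]
    rw [PySem.Str.isIn_iff_infix]
    simp
  | cons t ts =>
    rw [show (List.map (fun t => PySem.Chars.lower t.toList) (t :: ts))
          ++ [PySem.Chars.lower content.toList]
        = PySem.Chars.lower t.toList
          :: ((ts.map (fun t => PySem.Chars.lower t.toList)) ++ [PySem.Chars.lower content.toList])
        from rfl]
    rw [pv_infix_join hc]
    simp only [Bool.or_eq_true, List.any_eq_true, List.mem_cons, List.mem_append,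
      List.not_mem_nil, or_false, List.mem_map]
    constructor
    · rintro ⟨q, hq, hiq⟩
      rcases hq with rfl | ⟨⟨t', ht', rfl⟩ | rfl⟩
      · exact Or.inl ⟨t, Or.inl rfl, by rw [PySem.Str.isIn_iff_infix]; simpa using hiq⟩
      · exact Or.inl ⟨t', Or.inr ht', by rw [PySem.Str.isIn_iff_infix]; simpa using hiq⟩
      · exact Or.inr (by rw [PySem.Str.isIn_iff_infix]; simpa using hiq)
    · rintro (⟨t', ht', hit⟩ | hcon)
      · rw [PySem.Str.isIn_iff_infix] at hit
        rcases ht' with rfl | ht'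
        · exact ⟨PySem.Chars.lower t'.toList, Or.inl rfl, by simpa using hit⟩
        · exact ⟨PySem.Chars.lower t'.toList, Or.inr (Or.inl ⟨t', ht', rfl⟩), by simpa using hit⟩
      · rw [PySem.Str.isIn_iff_infix] at hcon
        exact ⟨PySem.Chars.lower content.toList, Or.inr (Or.inr rfl), by simpa using hcon⟩

-- ===== VERDICT (by name: the statement is the Claim_ definition above) =====
theorem is_nsfw_content_py_spec : Claim_equal_is_nsfw_content_py := by
  intro tags content _
  unfold Spec_is_nsfw_content_py is_nsfw_content_py is_nsfw_content_py_alt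
  simp only [pvTagLoop_eq_any]
  have hite : ∀ a b : Bool, (if a = true then true else if b = true then true else false)
      = (a || b) := by decide
  rw [hite]
  have hk : ∀ ind ∈ (["nsfw", "adult", "mature", "18+", "explicit"] : List String),
      '\n' ∉ ind.toList := by decide
  rw [Bool.eq_iff_iff, Bool.or_eq_true]
  simp only [List.any_eq_true]
  constructor
  · rintro (⟨t, ht, ind, hind, hit⟩ | ⟨ind, hind, hic⟩)
    · refine ⟨ind, hind, ?_⟩
      rw [pv_ind_combined ind (hk ind hind) tags content]
      rw [Bool.or_eq_true]
      exact Or.inl (List.any_eq_true.mpr ⟨t, ht, hit⟩)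
    · refine ⟨ind, hind, ?_⟩
      rw [pv_ind_combined ind (hk ind hind) tags content]
      rw [Bool.or_eq_true]
      exact Or.inr hic
  · rintro ⟨ind, hind, hin⟩
    rw [pv_ind_combined ind (hk ind hind) tags content] at hin
    rw [Bool.or_eq_true] at hin
    rcases hin with h | h
    · rcases List.any_eq_true.mp h with ⟨t, ht, hit⟩
      exact Or.inl ⟨t, ht, ind, hind, hit⟩
    · exact Or.inr ⟨ind, hind, h⟩
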